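-- pv_equiv track=rewrite | github.com/arushahmd/urdu-ocr-media-utils | pdf-to-text-urdu/pdf-ocr-pipeline/scripts/stats/book_wise_no_of_pages_and_lines.py | get_page_count
-- ===== SOURCE A (Python) =====
-- from collections import defaultdict
--
-- def get_page_count(file_names):
--     """
--     Calculates the number of unique pages for each book.
--
--     :param file_names: List of filenames.
--     :return: Dictionary with book names as keys and the number of unique pages as values.
--     """
--     page_count = defaultdict(set)
--
--     for file_name in file_names:
--         parts = file_name.split("_")
--         book_name = parts[0]
--         page_num = parts[1].replace("pg", "")
--         page_count[book_name].add(page_num)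
--
--     # Convert sets to their lengths to get the count of unique pages
--     page_count = {book: len(pages) for book, pages in page_count.items()}
--     return page_count
-- ===== SOURCE B (Python) =====
-- def get_page_count(file_names):
--     """
--     Calculates the number of unique pages for each book.
--
--     :param file_names: List of filenames.
--     :return: Dictionary with book names as keys and the number of unique pages as values.
--     """
--     pairs = []
--     for file_name in file_names:
--         parts = file_name.split("_")
--         pairs.append((parts[0], parts[1].replace("pg", "")))
--
--     # second stage: for each book, on first sight, rescan all pairs and
--     # count its distinct pages in one set comprehension
--     result = {}
--     for book, _ in pairs:
--         if book not in result:
--             result[book] = len({p for b, p in pairs if b == book})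
--     return result
-- ===== Notes on version B (the rewrite author's own statement) =====
-- stated objective: alternative
-- what changed: Replaces the single-pass dict-of-sets accumulator by two staged passes: parse all filenames into a pair list, then for each book at its first occurrence rescan the whole pair list and count its distinct pages with a set comprehension (nested scans instead of incremental per-book sets).
import Mathlib
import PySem

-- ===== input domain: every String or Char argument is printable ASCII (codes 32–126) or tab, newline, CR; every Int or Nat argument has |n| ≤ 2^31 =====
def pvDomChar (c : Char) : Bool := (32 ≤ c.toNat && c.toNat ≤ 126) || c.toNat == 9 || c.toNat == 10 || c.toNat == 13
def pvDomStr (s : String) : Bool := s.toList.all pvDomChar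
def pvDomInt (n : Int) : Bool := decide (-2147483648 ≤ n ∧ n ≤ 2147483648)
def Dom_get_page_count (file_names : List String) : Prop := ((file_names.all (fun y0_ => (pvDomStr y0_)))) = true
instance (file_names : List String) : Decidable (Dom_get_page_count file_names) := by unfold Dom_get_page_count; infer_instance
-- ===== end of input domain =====

-- B replaces A's single-pass dict-of-sets accumulator by two staged passes:
-- parse into a pair list, then per first-seen book a full rescan counting its
-- distinct pages (objective: alternative; not faster).


-- ===== PORT A =====
def get_page_count (file_names : List String) : List (String × Int) :=
  let page_count : PySem.Dict String (PySem.Set String) :=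
    file_names.foldl (fun d file_name =>
      let parts := (PySem.Str.split? file_name "_").getD []
      let book_name := PySem.List.pyGetD parts 0 ""
      let page_num := PySem.Str.replace (PySem.List.pyGetD parts 1 "") "pg" ""
      d.modify book_name PySem.Set.empty (fun s => PySem.Set.add s page_num))
      PySem.Dict.empty
  page_count.items.map (fun bp => (bp.1, PySem.Set.len bp.2))

-- ===== PORT B =====
def pvParseB (file_name : String) : String × String :=
  let parts := (PySem.Str.split? file_name "_").getD []
  (PySem.List.pyGetD parts 0 "", PySem.Str.replace (PySem.List.pyGetD parts 1 "") "pg" "")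

def get_page_count_alt (file_names : List String) : List (String × Int) :=
  let pairs := file_names.map pvParseB
  (pairs.foldl (fun result p =>
      if result.contains p.1 then result
      else result.insert p.1
        (PySem.Set.len (PySem.Set.ofList ((pairs.filter (fun q => q.1 == p.1)).map (fun q => q.2)))))
    PySem.Dict.empty).items

-- ===== PRECONDITION & SPEC =====
-- Pre_ excludes filenames containing no "_": Python A raises IndexError on parts[1] there (B raises identically).
def Pre_get_page_count (file_names : List String) : Prop :=
  ∀ f ∈ file_names, PySem.Str.isIn "_" f = true
instance (file_names : List String) : Decidable (Pre_get_page_count file_names) := by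
  unfold Pre_get_page_count; infer_instance

def pvWitness_get_page_count : List String :=
  ["book1_pg1.jpg", "book1_pg2.jpg", "book2_pg1.jpg", "book1_pg1.jpg"]

def Spec_get_page_count (file_names : List String) (out : List (String × Int)) : Prop := out = get_page_count_alt file_names
instance (file_names : List String) (out : List (String × Int)) : Decidable (Spec_get_page_count file_names out) := by unfold Spec_get_page_count; infer_instance

-- ===== CLAIM (what is proved, stated in full; the proofs are below) =====
def Claim_equal_get_page_count : Prop := ∀ (file_names : List String), Dom_get_page_count file_names → Pre_get_page_count file_names → Spec_get_page_count file_names (get_page_count file_names)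

-- ===== LEMMAS AND PROOFS =====

lemma pv_getD_foldl_modify_add (L : List (String × String))
    (d : PySem.Dict String (PySem.Set String)) (b : String) :
    (L.foldl (fun d x => d.modify x.1 PySem.Set.empty (fun s => PySem.Set.add s x.2)) d).getD b PySem.Set.empty
      = PySem.Set.update (d.getD b PySem.Set.empty) ((L.filter (fun x => x.1 == b)).map (fun x => x.2)) := by
  induction L generalizing d with
  | nil => simp [PySem.Set.update]
  | cons x L ih =>
      simp only [List.foldl_cons, List.filter_cons, ih]
      by_cases hb : x.1 = b
      · simp [hb, PySem.Set.update]
      · have hb' : ¬ b = x.1 := fun h => hb h.symm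
        simp [hb, hb', PySem.Dict.getD_modify, beq_iff_eq]

-- keys of B's conditional-insert loop: every pair's book, first occurrences in order
lemma pvB_keys (L : List (String × String)) (v : String → Int)
    (d : PySem.Dict String Int) :
    (L.foldl (fun r p => if r.contains p.1 then r else r.insert p.1 (v p.1)) d).keys
      = PySem.Set.update d.keys (L.map Prod.fst) := by
  induction L generalizing d with
  | nil => simp [PySem.Set.update]
  | cons p L ih =>
      simp only [List.foldl_cons, List.map_cons, PySem.Set.update_cons]
      by_cases hc : d.contains p.1 = true
      · have hm : p.1 ∈ d.keys := (PySem.Dict.contains_iff_mem_keys d p.1).mp hc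
        have : PySem.Set.add d.keys p.1 = d.keys := by
          simp [PySem.Set.add, PySem.Set.contains, hm]
        rw [hc]; simp only [if_true, ih, this]
      · have hc' : d.contains p.1 = false := by simpa using hc
        rw [hc']; simp only [Bool.false_eq_true, if_false, ih]
        have hk : (d.insert p.1 (v p.1)).keys = d.keys ++ [p.1] :=
          PySem.Dict.keys_insert_of_not_contains _ _ hc'
        have hm : p.1 ∉ d.keys := fun h =>
          absurd ((PySem.Dict.contains_iff_mem_keys d p.1).mpr h) (by simp [hc'])
        have : PySem.Set.add d.keys p.1 = d.keys ++ [p.1] := by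
          simp [PySem.Set.add, PySem.Set.contains, hm]
        rw [hk, this]

lemma pvB_nodup (L : List (String × String)) (v : String → Int)
    (d : PySem.Dict String Int) (hd : d.keys.Nodup) :
    (L.foldl (fun r p => if r.contains p.1 then r else r.insert p.1 (v p.1)) d).keys.Nodup := by
  induction L generalizing d with
  | nil => exact hd
  | cons p L ih =>
      simp only [List.foldl_cons]
      by_cases hc : d.contains p.1 = true
      · rw [hc]; simp only [if_true]; exact ih d hd
      · have hc' : d.contains p.1 = false := by simpa using hc
        rw [hc']; simp only [Bool.false_eq_true, if_false]
        exact ih _ (PySem.Dict.nodup_keys_insert _ _ _ hd)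

-- lookup in B's loop: value function depends only on the key, so first insert wins and agrees
lemma pvB_getD (L : List (String × String)) (v : String → Int)
    (d : PySem.Dict String Int) (k : String) :
    (L.foldl (fun r p => if r.contains p.1 then r else r.insert p.1 (v p.1)) d).getD k 0
      = if d.contains k then d.getD k 0 else if k ∈ L.map Prod.fst then v k else 0 := by
  induction L generalizing d with
  | nil =>
      simp only [List.foldl_nil, List.map_nil, List.not_mem_nil, if_false]
      by_cases hc : d.contains k = true
      · simp [hc]
      · have hc' : d.contains k = false := by simpa using hc
        simp only [hc', Bool.false_eq_true, if_false]
        exact PySem.Dict.getD_of_not_contains _ _ hc'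
  | cons p L ih =>
      simp only [List.foldl_cons, List.map_cons, List.mem_cons]
      by_cases hc : d.contains p.1 = true
      · rw [hc]; simp only [if_true, ih]
        by_cases hk : d.contains k = true
        · simp [hk]
        · have hk' : d.contains k = false := by simpa using hk
          have hne : ¬ k = p.1 := fun h => by rw [h] at hk'; rw [hc] at hk'; cases hk'
          simp only [hk', Bool.false_eq_true, if_false]
          exact (if_congr (or_iff_right hne) rfl rfl).symm
      · have hc' : d.contains p.1 = false := by simpa using hc
        rw [hc']; simp only [Bool.false_eq_true, if_false, ih]
        by_cases hk : k = p.1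
        · subst hk
          simp [hc']
        · have h1 : (d.insert p.1 (v p.1)).contains k = d.contains k := by
            simp [PySem.Dict.contains_insert, hk]
          have h2 : (d.insert p.1 (v p.1)).getD k 0 = d.getD k 0 := by
            simp [PySem.Dict.getD_insert, hk]
          rw [h1, h2]
          by_cases hdk : d.contains k = true
          · simp [hdk]
          · have hdk' : d.contains k = false := by simpa using hdk
            simp only [hdk', Bool.false_eq_true, if_false]
            exact (if_congr (or_iff_right hk) rfl rfl).symm

theorem pv_main (file_names : List String) :
    get_page_count file_names = get_page_count_alt file_names := by
  set L := file_names.map pvParseB with hL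
  set v : String → Int := fun b =>
    PySem.Set.len (PySem.Set.ofList ((L.filter (fun q => q.1 == b)).map (fun q => q.2))) with hv
  set D := L.foldl (fun d x => d.modify x.1 PySem.Set.empty (fun s => PySem.Set.add s x.2)) PySem.Dict.empty with hD
  have hA : get_page_count file_names = D.items.map (fun bp => (bp.1, PySem.Set.len bp.2)) := by
    simp only [get_page_count, hD, hL, List.foldl_map, pvParseB]
  have hAkeys : D.keys = PySem.Set.ofList (L.map Prod.fst) := by
    rw [hD, PySem.Dict.keys_foldl_modify_key L (fun x => x.1) PySem.Set.empty
      (fun _ x s => PySem.Set.add s x.2) PySem.Dict.empty]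
    simp [PySem.Set.update_nil_left]
  have hAnodup : D.keys.Nodup := by
    rw [hD]
    exact PySem.Dict.nodup_keys_foldl_modify_key L (fun x => x.1) PySem.Set.empty
      (fun _ x s => PySem.Set.add s x.2) PySem.Dict.empty PySem.Dict.nodup_keys_empty
  have hAget : ∀ b, D.getD b PySem.Set.empty
      = PySem.Set.ofList ((L.filter (fun x => x.1 == b)).map (fun x => x.2)) := by
    intro b
    rw [hD, pv_getD_foldl_modify_add, PySem.Dict.getD_empty]
    simp [PySem.Set.empty, PySem.Set.update_nil_left]
  set E := L.foldl (fun r p => if r.contains p.1 then r else r.insert p.1 (v p.1)) PySem.Dict.empty with hE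
  have hB : get_page_count_alt file_names = E.items := by
    simp only [get_page_count_alt, ← hL, hE, hv]
  have hBkeys : E.keys = PySem.Set.ofList (L.map Prod.fst) := by
    rw [hE, pvB_keys]
    simp [PySem.Set.update_nil_left]
  have hBnodup : E.keys.Nodup := pvB_nodup L v PySem.Dict.empty PySem.Dict.nodup_keys_empty
  rw [hA, hB,
    PySem.Dict.items_eq_map_keys D hAnodup PySem.Set.empty,
    PySem.Dict.items_eq_map_keys E hBnodup 0,
    List.map_map, hAkeys, hBkeys]
  apply List.map_congr_left
  intro b hb
  have hbm : b ∈ L.map Prod.fst := (PySem.Set.mem_ofList _ _).mp hb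
  have hBget : E.getD b 0 = v b := by
    rw [hE, pvB_getD]
    simp [PySem.Dict.contains_empty, hbm]
  simp only [Function.comp, hBget, hv, hAget b]

-- ===== VERDICT (by name: the statement is the Claim_ definition above) =====
theorem get_page_count_spec : Claim_equal_get_page_count := by
  intro fs _ _
  unfold Spec_get_page_count
  exact pv_main fs
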